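-- pv_equiv track=rewrite | github.com/ModeSevenIndustrialSolutions/lftools-ng | src/lftools_ng/core/gerrit_ssh.py | github_to_gerrit_candidates
-- ===== SOURCE A (Python) =====
-- from typing import Any, Dict, List, Optional, Tuple
--
-- def github_to_gerrit_candidates(github_name: str, gerrit_projects: List[str]) -> List[str]:
--     """Find possible Gerrit paths that could map to a GitHub repository name.
--
--     Args:
--         github_name: GitHub repository name
--         gerrit_projects: List of all Gerrit project paths
--
--     Returns:
--         List of possible Gerrit paths (ordered by likelihood)
--     """
--     candidates = []
--     github_lower = github_name.lower()
--
--     # Direct matches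
--     for gerrit_path in gerrit_projects:
--         if gerrit_path.lower() == github_lower:
--             candidates.append(gerrit_path)
--
--     # Last component matches
--     for gerrit_path in gerrit_projects:
--         if '/' in gerrit_path:
--             last_component = gerrit_path.split('/')[-1].lower()
--             if last_component == github_lower:
--                 candidates.append(gerrit_path)
--
--     # Flattened name matches (convert dashes back to slashes)
--     if '-' in github_name:
--         potential_path = github_name.replace('-', '/')
--         for gerrit_path in gerrit_projects:
--             if gerrit_path.lower() == potential_path.lower():
--                 candidates.append(gerrit_path)
--
--     return candidates
-- ===== SOURCE B (Python) =====
-- from typing import List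
--
--
-- def github_to_gerrit_candidates(github_name: str, gerrit_projects: List[str]) -> List[str]:
--     """Single pass over gerrit_projects with three buckets (direct / last-component /
--     flattened), concatenated afterwards to preserve the original category ordering."""
--     github_lower = github_name.lower()
--     has_dash = '-' in github_name
--     potential_lower = github_name.replace('-', '/').lower()
--
--     direct_bucket: List[str] = []
--     last_bucket: List[str] = []
--     flattened_bucket: List[str] = []
--
--     for gerrit_path in gerrit_projects:
--         path_lower = gerrit_path.lower()
--         if path_lower == github_lower:
--             direct_bucket.append(gerrit_path)
--         if '/' in gerrit_path and gerrit_path.split('/')[-1].lower() == github_lower: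
--             last_bucket.append(gerrit_path)
--         if has_dash and path_lower == potential_lower:
--             flattened_bucket.append(gerrit_path)
--
--     return direct_bucket + last_bucket + flattened_bucket
-- ===== Notes on version B (the rewrite author's own statement) =====
-- stated objective: alternative
-- what changed: Replaces A's three separate passes over gerrit_projects (with the flattened potential path re-lowered inside the loop) by one single pass maintaining three bucket lists with precomputed lowered keys, concatenated at the end.
import Mathlib
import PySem

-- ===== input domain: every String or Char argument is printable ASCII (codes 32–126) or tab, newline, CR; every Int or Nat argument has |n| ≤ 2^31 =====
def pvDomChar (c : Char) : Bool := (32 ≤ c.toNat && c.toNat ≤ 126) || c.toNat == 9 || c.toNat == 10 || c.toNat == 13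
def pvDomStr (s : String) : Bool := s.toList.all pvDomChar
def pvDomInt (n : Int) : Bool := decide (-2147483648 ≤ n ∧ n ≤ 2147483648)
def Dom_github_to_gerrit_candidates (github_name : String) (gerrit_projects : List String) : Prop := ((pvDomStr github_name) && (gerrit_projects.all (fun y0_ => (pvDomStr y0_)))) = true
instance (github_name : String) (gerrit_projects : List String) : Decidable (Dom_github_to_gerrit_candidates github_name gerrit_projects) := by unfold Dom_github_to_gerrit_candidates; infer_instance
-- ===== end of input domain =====

-- B replaces A's three separate passes over gerrit_projects by one single pass into three bucket lists concatenated at the end (alternative decomposition, same cost).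


-- ===== PORT A =====
def github_to_gerrit_candidates (github_name : String) (gerrit_projects : List String) : List String :=
  let github_lower := PySem.Str.lower github_name
  -- Direct matches
  let candidates := gerrit_projects.foldl (fun candidates gerrit_path =>
    if PySem.Str.lower gerrit_path = github_lower then candidates ++ [gerrit_path] else candidates) []
  -- Last component matches
  let candidates := gerrit_projects.foldl (fun candidates gerrit_path =>
    if PySem.Str.isIn "/" gerrit_path then
      let last_component := PySem.Str.lower (PySem.List.pyGetD ((PySem.Str.split? gerrit_path "/").getD []) (-1) "")
      if last_component = github_lower then candidates ++ [gerrit_path] else candidates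
    else candidates) candidates
  -- Flattened name matches
  if PySem.Str.isIn "-" github_name then
    let potential_path := PySem.Str.replace github_name "-" "/"
    gerrit_projects.foldl (fun candidates gerrit_path =>
      if PySem.Str.lower gerrit_path = PySem.Str.lower potential_path then candidates ++ [gerrit_path] else candidates) candidates
  else candidates

-- ===== PORT B =====
def github_to_gerrit_candidates_alt (github_name : String) (gerrit_projects : List String) : List String :=
  let github_lower := PySem.Str.lower github_name
  let has_dash := PySem.Str.isIn "-" github_name
  let potential_lower := PySem.Str.lower (PySem.Str.replace github_name "-" "/")
  let r := gerrit_projects.foldl (fun (acc : List String × List String × List String) gerrit_path =>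
    let path_lower := PySem.Str.lower gerrit_path
    let d := if path_lower = github_lower then acc.1 ++ [gerrit_path] else acc.1
    let l := if (PySem.Str.isIn "/" gerrit_path : Bool) ∧
                PySem.Str.lower (PySem.List.pyGetD ((PySem.Str.split? gerrit_path "/").getD []) (-1) "") = github_lower
             then acc.2.1 ++ [gerrit_path] else acc.2.1
    let f := if (has_dash : Bool) ∧ path_lower = potential_lower then acc.2.2 ++ [gerrit_path] else acc.2.2
    (d, l, f)) ([], [], [])
  r.1 ++ r.2.1 ++ r.2.2

-- ===== PRECONDITION & SPEC =====
def Spec_github_to_gerrit_candidates (github_name : String) (gerrit_projects : List String) (out : List String) : Prop := out = github_to_gerrit_candidates_alt github_name gerrit_projects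
instance (github_name : String) (gerrit_projects : List String) (out : List String) : Decidable (Spec_github_to_gerrit_candidates github_name gerrit_projects out) := by unfold Spec_github_to_gerrit_candidates; infer_instance

-- ===== CLAIM (what is proved, stated in full; the proofs are below) =====
def Claim_equal_github_to_gerrit_candidates : Prop := ∀ (github_name : String) (gerrit_projects : List String), Dom_github_to_gerrit_candidates github_name gerrit_projects → Spec_github_to_gerrit_candidates github_name gerrit_projects (github_to_gerrit_candidates github_name gerrit_projects)

-- ===== LEMMAS AND PROOFS =====

-- A conditional-append foldl is the accumulator followed by a filter.
theorem pv_foldl_filt {α : Type} (p : α → Prop) [DecidablePred p] :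
    ∀ (ps : List α) (acc : List α),
      List.foldl (fun a x => if p x then a ++ [x] else a) acc ps
        = acc ++ ps.filter (fun x => decide (p x)) := by
  intro ps
  induction ps with
  | nil => intro acc; simp
  | cons h t ih =>
      intro acc
      by_cases hp : p h <;> simp [List.foldl_cons, hp, ih]

-- B's single pass with three buckets is the three filters.
theorem pv_foldl3_spec {α : Type} (p q r : α → Prop)
    [DecidablePred p] [DecidablePred q] [DecidablePred r] :
    ∀ (ps : List α) (a b c : List α),
      List.foldl (fun (acc : List α × List α × List α) x =>
          (if p x then acc.1 ++ [x] else acc.1,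
           if q x then acc.2.1 ++ [x] else acc.2.1,
           if r x then acc.2.2 ++ [x] else acc.2.2)) (a, b, c) ps
        = (a ++ ps.filter (fun x => decide (p x)),
           b ++ ps.filter (fun x => decide (q x)),
           c ++ ps.filter (fun x => decide (r x))) := by
  intro ps
  induction ps with
  | nil => intro a b c; simp
  | cons h t ih =>
      intro a b c
      simp only [List.foldl_cons, List.filter_cons]
      rw [ih]
      by_cases hp : p h <;> by_cases hq : q h <;> by_cases hr : r h <;>
        simp [hp, hq, hr]

-- A's nested-if loop body for the last-component pass equals a single-condition body.
theorem pv_body2_eq (gl : String) :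
    (fun (a : List String) (x : String) =>
      if PySem.Str.isIn "/" x then
        if PySem.Str.lower (PySem.List.pyGetD ((PySem.Str.split? x "/").getD []) (-1) "") = gl
        then a ++ [x] else a
      else a)
    = (fun (a : List String) (x : String) =>
      if (PySem.Str.isIn "/" x : Bool) ∧
          PySem.Str.lower (PySem.List.pyGetD ((PySem.Str.split? x "/").getD []) (-1) "") = gl
      then a ++ [x] else a) := by
  funext a x
  by_cases h1 : (PySem.Str.isIn "/" x : Bool) <;>
    by_cases h2 : PySem.Str.lower (PySem.List.pyGetD ((PySem.Str.split? x "/").getD []) (-1) "") = gl <;>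
    simp [h2]

-- ===== VERDICT (by name: the statement is the Claim_ definition above) =====
theorem github_to_gerrit_candidates_spec : Claim_equal_github_to_gerrit_candidates := by
  intro gn ps _
  show github_to_gerrit_candidates gn ps = github_to_gerrit_candidates_alt gn ps
  simp only [github_to_gerrit_candidates, github_to_gerrit_candidates_alt]
  rw [pv_body2_eq (PySem.Str.lower gn)]
  rw [pv_foldl3_spec
        (fun x => PySem.Str.lower x = PySem.Str.lower gn)
        (fun x => (PySem.Str.isIn "/" x : Bool) ∧
          PySem.Str.lower (PySem.List.pyGetD ((PySem.Str.split? x "/").getD []) (-1) "") = PySem.Str.lower gn)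
        (fun x => (PySem.Str.isIn "-" gn : Bool) ∧
          PySem.Str.lower x = PySem.Str.lower (PySem.Str.replace gn "-" "/"))]
  rw [pv_foldl_filt (fun x => PySem.Str.lower x = PySem.Str.lower gn),
      pv_foldl_filt (fun x => (PySem.Str.isIn "/" x : Bool) ∧
        PySem.Str.lower (PySem.List.pyGetD ((PySem.Str.split? x "/").getD []) (-1) "") = PySem.Str.lower gn)]
  by_cases hd : (PySem.Str.isIn "-" gn : Bool)
  · rw [if_pos hd,
        pv_foldl_filt (fun x => PySem.Str.lower x = PySem.Str.lower (PySem.Str.replace gn "-" "/"))]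
    have hd' : PySem.Chars.isIn ['-'] gn.toList = true := by simpa using hd
    simp [hd']
  · rw [if_neg hd]
    have hd' : PySem.Chars.isIn ['-'] gn.toList = false := by simpa using hd
    simp [hd']
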